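-- pv_equiv track=rewrite | github.com/DashFin-FarDb/financial-asset-relationship-db | scripts/validate_manifest.py | _collect_headings
-- ===== SOURCE A (Python) =====
-- from typing import Dict, List
--
-- def _collect_headings(lines: List[str]) -> Dict[str, List[int]]:
--     """
--     Collect level-2 Markdown headings and their 1-based line numbers.
--
--     Parameters:
--         lines (List[str]): Lines of a Markdown document in order; lines may include line endings.
--
--     Returns:
--         Dict[str, List[int]]: Mapping from each level-2 heading text (the text following '##') to a list of 1-based line numbers where that heading appears.
--     """
--     occurrences: Dict[str, List[int]] = {}
--
--     for line_num, line in enumerate(lines, start=1):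
--         stripped = line.strip()
--         if stripped.startswith("## ") and not stripped.startswith("### "):
--             heading = stripped[3:].strip()
--             occurrences.setdefault(heading, []).append(line_num)
--
--     return occurrences
-- ===== SOURCE B (Python) =====
-- from typing import Dict, List
--
--
-- def _collect_headings(lines: List[str]) -> Dict[str, List[int]]:
--     # Flat extraction pass, then grouping by a dict comprehension over the pairs.
--     pairs = [
--         (s[3:].strip(), num)
--         for num, line in enumerate(lines, start=1)
--         for s in [line.strip()]
--         if s.startswith("## ") and not s.startswith("### ")
--     ]
--     return {h: [n for h2, n in pairs if h2 == h] for h, _ in pairs}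
-- ===== Notes on version B (the rewrite author's own statement) =====
-- stated objective: alternative
-- what changed: Replaces the incremental setdefault-append dict accumulation with a flat extraction of (heading, line) pairs followed by a grouping dict comprehension that filters the pair list per heading.
import Mathlib
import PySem

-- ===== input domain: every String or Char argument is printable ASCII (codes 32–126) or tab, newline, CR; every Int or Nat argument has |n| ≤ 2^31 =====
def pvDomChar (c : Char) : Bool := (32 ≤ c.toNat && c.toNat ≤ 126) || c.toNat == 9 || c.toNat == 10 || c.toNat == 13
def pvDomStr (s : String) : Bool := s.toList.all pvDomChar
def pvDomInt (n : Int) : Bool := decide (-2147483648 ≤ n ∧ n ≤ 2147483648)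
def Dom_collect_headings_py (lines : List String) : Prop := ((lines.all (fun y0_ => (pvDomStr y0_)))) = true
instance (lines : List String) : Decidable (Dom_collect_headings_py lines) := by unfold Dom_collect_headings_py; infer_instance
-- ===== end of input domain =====

-- B replaces A's incremental setdefault-append dict accumulation by a flat extraction of
-- (heading, line) pairs followed by a grouping dict comprehension (alternative decomposition).


-- ===== PORT A =====
def collect_headings_py (lines : List String) : List (String × List Int) :=
  ((PySem.List.enumerate lines 1).foldl (fun occurrences p =>
      let stripped := PySem.Str.strip p.2
      if PySem.Str.startswith stripped "## " && !PySem.Str.startswith stripped "### " then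
        occurrences.modify (PySem.Str.strip (PySem.Str.slice stripped (some 3) none)) []
          (fun l => l ++ [p.1])
      else occurrences) PySem.Dict.empty).items

-- ===== PORT B =====
def collect_headings_py_alt (lines : List String) : List (String × List Int) :=
  let pairs : List (String × Int) :=
    (PySem.List.enumerate lines 1).foldl (fun acc p =>
      let s := PySem.Str.strip p.2
      if PySem.Str.startswith s "## " && !PySem.Str.startswith s "### " then
        acc ++ [(PySem.Str.strip (PySem.Str.slice s (some 3) none), p.1)]
      else acc) []
  (pairs.foldl (fun d p =>
      d.insert p.1 ((pairs.filter (fun q => q.1 == p.1)).map (fun q => q.2)))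
    PySem.Dict.empty).items

-- ===== PRECONDITION & SPEC =====
def Spec_collect_headings_py (lines : List String) (out : List (String × List Int)) : Prop := out = collect_headings_py_alt lines
instance (lines : List String) (out : List (String × List Int)) : Decidable (Spec_collect_headings_py lines out) := by unfold Spec_collect_headings_py; infer_instance

-- ===== CLAIM (what is proved, stated in full; the proofs are below) =====
def Claim_equal_collect_headings_py : Prop := ∀ (lines : List String), Dom_collect_headings_py lines → Spec_collect_headings_py lines (collect_headings_py lines)

-- ===== LEMMAS AND PROOFS =====

-- the level-2-heading test and the (heading, line-number) extraction, as functions on one enumerated line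
def pvIsH2 (p : Int × String) : Bool :=
  PySem.Str.startswith (PySem.Str.strip p.2) "## " &&
    !PySem.Str.startswith (PySem.Str.strip p.2) "### "

def pvPair (p : Int × String) : String × Int :=
  (PySem.Str.strip (PySem.Str.slice (PySem.Str.strip p.2) (some 3) none), p.1)

-- B's extraction loop body, rewritten through pvIsH2/pvPair (definitional)
theorem pvHfunB : (fun (acc : List (String × Int)) (p : Int × String) =>
      let s := PySem.Str.strip p.2
      if PySem.Str.startswith s "## " && !PySem.Str.startswith s "### " then
        acc ++ [(PySem.Str.strip (PySem.Str.slice s (some 3) none), p.1)]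
      else acc) =
    (fun acc p => if pvIsH2 p then acc ++ [pvPair p] else acc) := rfl

-- A's loop body, rewritten through pvIsH2/pvPair (definitional)
set_option maxHeartbeats 1000000 in
theorem pvHfunA : (fun (occurrences : PySem.Dict String (List Int)) (p : Int × String) =>
      let stripped := PySem.Str.strip p.2
      if PySem.Str.startswith stripped "## " && !PySem.Str.startswith stripped "### " then
        occurrences.modify (PySem.Str.strip (PySem.Str.slice stripped (some 3) none)) []
          (fun l => l ++ [p.1])
      else occurrences) =
    (fun d p => if pvIsH2 p then
        (fun d (q : String × Int) => d.modify q.1 [] (fun x => x ++ [q.2])) d (pvPair p)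
      else d) := rfl

-- B's first pass produces exactly the filtered-and-mapped pair list
theorem pvPairsB_eq (lines : List String) :
    (PySem.List.enumerate lines 1).foldl (fun acc p =>
      let s := PySem.Str.strip p.2
      if PySem.Str.startswith s "## " && !PySem.Str.startswith s "### " then
        acc ++ [(PySem.Str.strip (PySem.Str.slice s (some 3) none), p.1)]
      else acc) [] =
    ((PySem.List.enumerate lines 1).filter pvIsH2).map pvPair := by
  rw [pvHfunB]
  exact PySem.List.foldl_append_if pvIsH2 pvPair (PySem.List.enumerate lines 1) []

-- a guarded fold is the fold of the filtered-and-mapped list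
theorem pvFoldl_if_filter_map {α β γ : Type} (P : α → Bool) (F : α → β)
    (g : γ → β → γ) (l : List α) (d : γ) :
    l.foldl (fun d p => if P p then g d (F p) else d) d =
    ((l.filter P).map F).foldl g d := by
  induction l generalizing d with
  | nil => rfl
  | cons p t ih =>
    by_cases h : P p
    · simp [h, ih]
    · simp [h, ih]

-- A's dict loop is the plain modify-append loop over the same pair list
set_option maxHeartbeats 1000000 in
theorem pvFoldA_eq (lines : List String) :
    (PySem.List.enumerate lines 1).foldl (fun occurrences p =>
      let stripped := PySem.Str.strip p.2
      if PySem.Str.startswith stripped "## " && !PySem.Str.startswith stripped "### " then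
        occurrences.modify (PySem.Str.strip (PySem.Str.slice stripped (some 3) none)) []
          (fun l => l ++ [p.1])
      else occurrences) PySem.Dict.empty =
    (((PySem.List.enumerate lines 1).filter pvIsH2).map pvPair).foldl
      (fun d p => d.modify p.1 [] (fun x => x ++ [p.2])) PySem.Dict.empty := by
  rw [pvHfunA]
  exact pvFoldl_if_filter_map pvIsH2 pvPair
    (fun (d : PySem.Dict String (List Int)) (q : String × Int) =>
      d.modify q.1 [] (fun x => x ++ [q.2])) (PySem.List.enumerate lines 1) PySem.Dict.empty

-- lookup in B's insert loop: each insert stores a value depending only on the key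
theorem pvGetD_foldl_insert_keyed (v : String → List Int) (l : List (String × Int))
    (d : PySem.Dict String (List Int)) (k : String) :
    (l.foldl (fun d p => d.insert p.1 (v p.1)) d).getD k [] =
    if k ∈ l.map (fun q => q.1) then v k else d.getD k [] := by
  induction l generalizing d with
  | nil => simp
  | cons p t ih =>
    simp only [List.foldl_cons, ih, List.map_cons, List.mem_cons, PySem.Dict.getD_insert]
    by_cases hk : k ∈ t.map (fun q => q.1)
    · simp [hk]
    · by_cases he : k = p.1 <;> simp [hk, he]

-- core: the modify-append dict and the keyed-insert dict have the same items
theorem pvItems_eq (pairs : List (String × Int)) :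
    (pairs.foldl (fun d p => d.modify p.1 [] (fun x => x ++ [p.2])) PySem.Dict.empty).items =
    (pairs.foldl (fun d p =>
        d.insert p.1 ((pairs.filter (fun q => q.1 == p.1)).map (fun q => q.2)))
      PySem.Dict.empty).items := by
  have hndA : (pairs.foldl (fun d p => d.modify p.1 [] (fun x => x ++ [p.2]))
      PySem.Dict.empty).keys.Nodup :=
    PySem.Dict.nodup_keys_foldl_modify_key pairs (fun q => q.1) [] (fun _ q x => x ++ [q.2])
      PySem.Dict.empty (by simp [PySem.Dict.keys_empty])
  have hndB : (pairs.foldl (fun d p =>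
      d.insert p.1 ((pairs.filter (fun q => q.1 == p.1)).map (fun q => q.2)))
      PySem.Dict.empty).keys.Nodup :=
    PySem.Dict.nodup_keys_foldl_insert_key pairs (fun q => q.1)
      (fun _ q => (pairs.filter (fun r => r.1 == q.1)).map (fun r => r.2))
      PySem.Dict.empty (by simp [PySem.Dict.keys_empty])
  rw [PySem.Dict.items_eq_map_keys _ hndA [], PySem.Dict.items_eq_map_keys _ hndB []]
  have hkA := PySem.Dict.keys_foldl_modify_key pairs (fun q => q.1) []
    (fun _ q x => x ++ [q.2]) PySem.Dict.empty
  have hkB := PySem.Dict.keys_foldl_insert_key pairs (fun q => q.1)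
    (fun _ q => (pairs.filter (fun r => r.1 == q.1)).map (fun r => r.2)) PySem.Dict.empty
  rw [hkA, hkB]
  apply List.map_congr_left
  intro k hk
  have hkmem : k ∈ pairs.map (fun q => q.1) := by
    have : k ∈ PySem.Set.ofList (pairs.map (fun q => q.1)) := by
      simpa [PySem.Dict.keys_empty] using hk
    exact (PySem.Set.mem_ofList _ _).mp this
  have hA := PySem.Dict.getD_foldl_modify_append pairs PySem.Dict.empty k
  have hB := pvGetD_foldl_insert_keyed
    (fun c => (pairs.filter (fun q => q.1 == c)).map (fun q => q.2)) pairs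
    PySem.Dict.empty k
  simp only [hA, hB, if_pos hkmem]
  simp

-- ===== VERDICT (by name: the statement is the Claim_ definition above) =====
set_option maxHeartbeats 1000000 in
theorem collect_headings_py_spec : Claim_equal_collect_headings_py := by
  intro lines _
  unfold Spec_collect_headings_py collect_headings_py collect_headings_py_alt
  rw [pvFoldA_eq]
  simp only [pvPairsB_eq]
  exact pvItems_eq _
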